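-- pv_equiv track=rewrite | github.com/piyushsinha24/nptel_python | week4.py | orangecap
-- ===== SOURCE A (Python) =====
-- def orangecap(d):
--     score = {}
--     for match in d:
--         for player in d[match]:
--             if player in score:
--                 score[player] += d[match][player]
--             else:
--                 score[player] = d[match][player]
--
--     (playername, topscore) = ("", 0)
--     for player in score:
--         if score[player] > topscore:
--             topscore = score[player]
--             playername = player
--
--     return (playername, topscore)
-- ===== SOURCE B (Python) =====
-- def orangecap(d):
--     totals = {}
--     for scores in d.values():
--         for player, runs in scores.items():
--             totals[player] = totals.get(player, 0) + runs
--     ranking = sorted(totals.items(), key=lambda kv: kv[1], reverse=True)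
--     if ranking and ranking[0][1] > 0:
--         return ranking[0]
--     return ("", 0)
-- ===== Notes on version B (the rewrite author's own statement) =====
-- stated objective: alternative
-- what changed: B flattens the match dicts into one aggregation pass with dict.get (no membership branch, no repeated d[match] lookups) and then replaces A's manual running-max scan by a stable descending sort of the totals, taking the head with the same >0 guard.
import Mathlib
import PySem

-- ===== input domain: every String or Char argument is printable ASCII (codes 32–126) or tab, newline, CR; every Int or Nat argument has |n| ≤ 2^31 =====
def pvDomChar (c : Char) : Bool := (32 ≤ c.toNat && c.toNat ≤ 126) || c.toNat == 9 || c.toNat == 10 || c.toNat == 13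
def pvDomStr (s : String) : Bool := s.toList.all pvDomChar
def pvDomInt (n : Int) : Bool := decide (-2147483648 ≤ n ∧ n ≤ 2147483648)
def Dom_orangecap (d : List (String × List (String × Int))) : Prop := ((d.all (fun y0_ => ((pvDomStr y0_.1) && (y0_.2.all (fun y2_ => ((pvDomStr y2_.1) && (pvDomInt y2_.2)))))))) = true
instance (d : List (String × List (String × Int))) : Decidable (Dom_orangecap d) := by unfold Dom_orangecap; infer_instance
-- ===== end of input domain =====

-- B replaces A's membership-branching dict build and manual running-max scan by a single
-- get-default aggregation pass plus a stable descending sort of the totals (alternative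
-- decomposition, similar cost).


-- ===== PORT A =====
def orangecap (d : List (String × List (String × Int))) : String × Int :=
  let dd : PySem.Dict String (PySem.Dict String Int) :=
    PySem.Dict.mk (d.map (fun p => (p.1, PySem.Dict.mk p.2)))
  let score : PySem.Dict String Int :=
    dd.keys.foldl (fun score m =>
      (dd.getD m PySem.Dict.empty).keys.foldl (fun score player =>
        if score.contains player then
          score.insert player (score.getD player 0 + (dd.getD m PySem.Dict.empty).getD player 0)
        else
          score.insert player ((dd.getD m PySem.Dict.empty).getD player 0))
        score) PySem.Dict.empty
  score.keys.foldl (fun pt player =>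
    if score.getD player 0 > pt.2 then (player, score.getD player 0) else pt) ("", 0)

-- ===== PORT B =====
def orangecap_alt (d : List (String × List (String × Int))) : String × Int :=
  let totals : PySem.Dict String Int :=
    d.foldl (fun t p =>
      p.2.foldl (fun t q => t.insert q.1 (t.getD q.1 0 + q.2)) t) PySem.Dict.empty
  let ranking := PySem.List.sorted totals.items (fun kv => kv.2) true
  match ranking with
  | [] => ("", 0)
  | b :: _ => if b.2 > 0 then b else ("", 0)

-- ===== PRECONDITION & SPEC =====
-- Pre_ excludes association lists with a duplicated match key or a duplicated player key
-- inside one match: those do not represent any Python dict (a dict cannot hold duplicate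
-- keys), so A is never called on them.
def Pre_orangecap (d : List (String × List (String × Int))) : Prop :=
  (d.map Prod.fst).Nodup ∧ ∀ p ∈ d, (p.2.map Prod.fst).Nodup
instance (d : List (String × List (String × Int))) : Decidable (Pre_orangecap d) := by
  unfold Pre_orangecap; infer_instance
def pvWitness_orangecap : (List (String × List (String × Int))) :=
  [("m1", [("p1", 10), ("p2", -3)]), ("m2", [("p1", 5)])]

def Spec_orangecap (d : List (String × List (String × Int))) (out : String × Int) : Prop := out = orangecap_alt d
instance (d : List (String × List (String × Int))) (out : String × Int) : Decidable (Spec_orangecap d out) := by unfold Spec_orangecap; infer_instance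

-- ===== CLAIM (what is proved, stated in full; the proofs are below) =====
def Claim_equal_orangecap : Prop := ∀ (d : List (String × List (String × Int))), Dom_orangecap d → Pre_orangecap d → Spec_orangecap d (orangecap d)

-- ===== LEMMAS AND PROOFS =====

-- the step of A's final running-max scan, on (player, total) pairs
def pvStep (pt q : String × Int) : String × Int := if pt.2 < q.2 then q else pt

def pvRun (p : String × Int) (l : List (String × Int)) : String × Int := l.foldl pvStep p

def pvRunO (o : Option (String × Int)) (l : List (String × Int)) : Option (String × Int) :=
  l.foldl (fun o q => some (match o with | none => q | some p => pvStep p q)) o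

theorem pvRunO_some (l : List (String × Int)) (p : String × Int) :
    pvRunO (some p) l = some (pvRun p l) := by
  induction l generalizing p with
  | nil => rfl
  | cons x t ih => simpa [pvRunO, pvRun, List.foldl_cons] using ih (pvStep p x)

theorem pv_head_insertBy (x : String × Int) (acc : List (String × Int)) :
    (PySem.List.insertBy (fun a b => decide (b.2 < a.2)) x acc).head? =
      some (match acc.head? with | none => x | some y => pvStep y x) := by
  cases acc with
  | nil => rfl
  | cons y ys =>
    simp only [PySem.List.insertBy, pvStep]
    split_ifs with h <;> simp_all

theorem pv_head_foldl_insertBy (l : List (String × Int)) (acc : List (String × Int)) :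
    (l.foldl (fun acc x => PySem.List.insertBy (fun a b => decide (b.2 < a.2)) x acc) acc).head? =
      pvRunO acc.head? l := by
  induction l generalizing acc with
  | nil => rfl
  | cons x t ih =>
    simp only [List.foldl_cons, pvRunO, ih, pv_head_insertBy]

theorem pvRun_le (l : List (String × Int)) (p : String × Int) : p.2 ≤ (pvRun p l).2 := by
  induction l generalizing p with
  | nil => simp [pvRun]
  | cons x t ih =>
    simp only [pvRun, List.foldl_cons, pvStep]
    split_ifs with h
    · exact le_of_lt (lt_of_lt_of_le h (ih x))
    · exact ih p

theorem pvRun_eq_or_lt (l : List (String × Int)) (p : String × Int) :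
    pvRun p l = p ∨ p.2 < (pvRun p l).2 := by
  induction l generalizing p with
  | nil => left; rfl
  | cons x t ih =>
    simp only [pvRun, List.foldl_cons, pvStep]
    split_ifs with h
    · right; exact lt_of_lt_of_le h (pvRun_le t x)
    · exact ih p

theorem pvRun_pair (l : List (String × Int)) (a b : String × Int) (hba : b.2 ≤ a.2) :
    pvRun a l = pvRun b l ∨ (pvRun a l = a ∧ (pvRun b l).2 ≤ a.2) := by
  induction l generalizing a b with
  | nil => right; exact ⟨rfl, hba⟩
  | cons x t ih =>
    simp only [pvRun, List.foldl_cons, pvStep]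
    by_cases ha : a.2 < x.2
    · have hb : b.2 < x.2 := lt_of_le_of_lt hba ha
      left; rw [if_pos ha, if_pos hb]
    · simp only [if_neg ha]
      by_cases hb : b.2 < x.2
      · simp only [if_pos hb]; exact ih a x (le_of_not_gt ha)
      · simp only [if_neg hb]; exact ih a b hba

-- A's running-max scan over a pair list equals B's sorted-head-with-threshold
theorem pv_scan_eq_sorted (l : List (String × Int)) :
    pvRun ("", 0) l =
      (match PySem.List.sorted l (fun kv => kv.2) true with
       | [] => ("", 0)
       | b :: _ => if b.2 > 0 then b else ("", 0)) := by
  cases l with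
  | nil => rfl
  | cons x t =>
    have hne : PySem.List.sorted (x :: t) (fun kv => kv.2) true ≠ [] := by
      simp [PySem.List.sorted_eq_nil_iff]
    obtain ⟨m, rest, hm⟩ := List.exists_cons_of_ne_nil hne
    have hhead : (PySem.List.sorted (x :: t) (fun kv => kv.2) true).head? = some (pvRun x t) := by
      rw [PySem.List.sorted_rev_eq_foldl_insertBy]
      rw [pv_head_foldl_insertBy]
      simp only [List.head?_nil, pvRunO, List.foldl_cons]
      exact pvRunO_some t x
    rw [hm] at hhead ⊢
    simp only [List.head?_cons, Option.some.injEq] at hhead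
    subst hhead
    have hrunL : pvRun ("", 0) (x :: t) = pvRun (pvStep ("", 0) x) t := by
      simp [pvRun, List.foldl_cons]
    rw [hrunL]
    by_cases hx : (0 : Int) < x.2
    · have hs : pvStep ("", 0) x = x := by simp [pvStep, hx]
      rw [hs]
      have : (0 : Int) < (pvRun x t).2 := lt_of_lt_of_le hx (pvRun_le t x)
      simp [gt_iff_lt, this]
    · have hs : pvStep ("", 0) x = ("", 0) := by simp [pvStep, hx]
      rw [hs]
      have hx' : x.2 ≤ (("", (0 : Int)) : String × Int).2 := le_of_not_gt hx
      rcases pvRun_pair t ("", 0) x hx' with heq | ⟨h0, hle⟩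
      · rw [heq]
        by_cases hm2 : (0 : Int) < (pvRun x t).2
        · simp [gt_iff_lt, hm2]
        · have hle' : (pvRun x t).2 ≤ 0 := le_of_not_gt hm2
          rcases pvRun_eq_or_lt t ("", 0) with h | h
          · rw [← heq] at hle' hm2 ⊢
            rw [h]; simp
          · rw [heq] at h; exact absurd (lt_of_lt_of_le h hle') (by simp)
      · rw [h0]
        have : ¬ (0 : Int) < (pvRun x t).2 := not_lt.mpr hle
        simp [gt_iff_lt, this]

-- B's totals dict, as a standalone function of the input
def pvTotals (d : List (String × List (String × Int))) : PySem.Dict String Int :=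
  d.foldl (fun t p =>
    p.2.foldl (fun t q => t.insert q.1 (t.getD q.1 0 + q.2)) t) PySem.Dict.empty

theorem pvTotals_nodup (d : List (String × List (String × Int))) :
    (pvTotals d).keys.Nodup := by
  suffices h : ∀ (l : List (String × List (String × Int))) (t : PySem.Dict String Int),
      t.keys.Nodup →
      (l.foldl (fun t p => p.2.foldl (fun t q => t.insert q.1 (t.getD q.1 0 + q.2)) t) t).keys.Nodup by
    exact h d PySem.Dict.empty (by simp [PySem.Dict.keys, PySem.Dict.empty])
  intro l
  induction l with
  | nil => intro t ht; simpa using ht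
  | cons p rest ih =>
    intro t ht
    simp only [List.foldl_cons]
    exact ih _ (PySem.Dict.nodup_keys_foldl_insert_key p.2 Prod.fst
      (fun t q => t.getD q.1 0 + q.2) t ht)

-- the inner per-match loop of A equals the inner loop of B, on nodup inner keys
theorem pv_inner_eq (l : List (String × Int)) (hl : (l.map Prod.fst).Nodup)
    (t : PySem.Dict String Int) :
    (PySem.Dict.mk l).keys.foldl (fun score player =>
      if score.contains player then
        score.insert player (score.getD player 0 + (PySem.Dict.mk l).getD player 0)
      else
        score.insert player ((PySem.Dict.mk l).getD player 0)) t =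
    l.foldl (fun t q => t.insert q.1 (t.getD q.1 0 + q.2)) t := by
  have hnd : (PySem.Dict.mk l).keys.Nodup := by simpa [PySem.Dict.keys_mk] using hl
  have hitems : (PySem.Dict.mk l).items = (PySem.Dict.mk l).keys.map
      (fun k => (k, (PySem.Dict.mk l).getD k 0)) := PySem.Dict.items_eq_map_keys _ hnd 0
  have hl' : l = (PySem.Dict.mk l).keys.map (fun k => (k, (PySem.Dict.mk l).getD k 0)) := hitems
  conv_rhs => rw [hl']
  rw [List.foldl_map]
  apply PySem.List.foldl_congr_mem
  intro acc k _
  by_cases hc : acc.contains k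
  · simp [hc]
  · simp only [hc, if_neg, Bool.false_eq_true, not_false_eq_true,
      PySem.Dict.getD_of_not_contains acc 0 (by simpa using hc)]
    rw [zero_add]

-- A's score dict equals B's totals dict on Pre_
theorem pv_score_eq (d : List (String × List (String × Int))) (hpre : Pre_orangecap d) :
    (PySem.Dict.mk (d.map (fun p => (p.1, PySem.Dict.mk p.2)))).keys.foldl
      (fun score m =>
        ((PySem.Dict.mk (d.map (fun p => (p.1, PySem.Dict.mk p.2)))).getD m PySem.Dict.empty).keys.foldl
          (fun score player =>
            if score.contains player then
              score.insert player (score.getD player 0 +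
                ((PySem.Dict.mk (d.map (fun p => (p.1, PySem.Dict.mk p.2)))).getD m PySem.Dict.empty).getD player 0)
            else
              score.insert player
                (((PySem.Dict.mk (d.map (fun p => (p.1, PySem.Dict.mk p.2)))).getD m PySem.Dict.empty).getD player 0))
          score) PySem.Dict.empty = pvTotals d := by
  obtain ⟨hout, hin⟩ := hpre
  set dd := PySem.Dict.mk (d.map (fun p => (p.1, PySem.Dict.mk p.2))) with hdd
  have hknd : dd.keys.Nodup := by
    simpa [hdd, PySem.Dict.keys_mk, List.map_map, Function.comp] using hout
  have hitems : dd.items = dd.keys.map (fun k => (k, dd.getD k PySem.Dict.empty)) :=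
    PySem.Dict.items_eq_map_keys _ hknd PySem.Dict.empty
  have hitems' : d.map (fun p => (p.1, PySem.Dict.mk p.2)) =
      dd.keys.map (fun k => (k, dd.getD k PySem.Dict.empty)) := hitems
  -- turn the fold over keys-with-lookup into a fold over the original list
  have step1 : dd.keys.foldl (fun score m =>
        (dd.getD m PySem.Dict.empty).keys.foldl (fun score player =>
          if score.contains player then
            score.insert player (score.getD player 0 + (dd.getD m PySem.Dict.empty).getD player 0)
          else
            score.insert player ((dd.getD m PySem.Dict.empty).getD player 0)) score)
        PySem.Dict.empty =
      (dd.keys.map (fun k => (k, dd.getD k PySem.Dict.empty))).foldl (fun score p =>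
        p.2.keys.foldl (fun score player =>
          if score.contains player then
            score.insert player (score.getD player 0 + p.2.getD player 0)
          else
            score.insert player (p.2.getD player 0)) score) PySem.Dict.empty := by
    rw [List.foldl_map]
  rw [step1, ← hitems', List.foldl_map, pvTotals]
  apply PySem.List.foldl_congr_mem
  intro acc p hp
  exact pv_inner_eq p.2 (hin p hp) acc

-- A's final scan over keys-with-lookup equals the pair scan over items, on nodup keys
theorem pv_final_scan (s : PySem.Dict String Int) (hnd : s.keys.Nodup) :
    s.keys.foldl (fun pt player =>
      if s.getD player 0 > pt.2 then (player, s.getD player 0) else pt) ("", 0) =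
    pvRun ("", 0) s.items := by
  have hitems : s.items = s.keys.map (fun k => (k, s.getD k 0)) :=
    PySem.Dict.items_eq_map_keys _ hnd 0
  rw [pvRun, hitems, List.foldl_map]
  apply PySem.List.foldl_congr_mem
  intro pt k _
  simp only [pvStep, gt_iff_lt]

-- ===== VERDICT (by name: the statement is the Claim_ definition above) =====
theorem orangecap_spec : Claim_equal_orangecap := by
  intro d _ hpre
  unfold Spec_orangecap orangecap orangecap_alt
  simp only []
  rw [pv_score_eq d hpre, pv_final_scan (pvTotals d) (pvTotals_nodup d),
    pv_scan_eq_sorted]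
  rfl
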